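-- pv_equiv track=rewrite | github.com/Tinnci/HiTagS-Writer | sim_manchester.py | simulate_tim2_capture
-- ===== SOURCE A (Python) =====
-- def simulate_tim2_capture(waveform):
--     """
--     Simulate TIM2 capture ISR from merged waveform.
--
--     TIM2 setup:
--     - COMP1: antenna > 0.6V → HIGH output (= UNLOAD = carrier strong)
--     - CH3 (indirect, falling edge): captures HIGH pulse width → callback(true, high_dur)
--     - CH4 (direct, rising edge + counter reset): captures period → callback(false, period)
--
--     The ISR fires:
--     1. On falling edge of COMP1 (HIGH→LOW = UNLOAD→LOAD):
--        CC3 captures counter value = duration of HIGH pulse → callback(true, high_dur)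
--     2. On rising edge of COMP1 (LOW→HIGH = LOAD→UNLOAD):
--        CC4 captures counter value = period (since last reset) → callback(false, period)
--        Counter reset to 0
--
--     So for each COMP1 cycle:
--     - Rising edge: CC4 fires → callback(false, full_period), counter=0
--     - Falling edge: CC3 fires → callback(true, high_dur_since_rising)
--
--     The callback sequence is: (false, period), (true, high_dur), (false, period), ...
--     But actually the FIRST event depends on what COMP1 starts at.
--
--     Let's trace through a real waveform starting from carrier on (COMP1 HIGH = UNLOAD):
--     """
--     events = []  # [(level_bool, duration_us)]
--
--     # Track COMP1 state and counter
--     counter = 0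
--
--     for i, (is_unload, dur) in enumerate(waveform):
--         is_high = is_unload  # COMP1: UNLOAD → HIGH
--
--         if is_high:
--             # HIGH pulse → will end with falling edge
--             # Falling edge fires CC3: callback(true, counter + dur)
--             # But wait - CC3 captures counter value at falling edge
--             # Counter has been running since last CC4 reset
--             counter += dur
--             events.append((True, counter))  # CC3 event
--         else:
--             # LOW pulse → will end with rising edge
--             # Rising edge fires CC4: callback(false, counter + dur), then counter=0
--             counter += dur
--             events.append((False, counter))  # CC4 event
--             counter = 0  # CC4 resets counter
--
--     return events
-- ===== SOURCE B (Python) =====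
-- def simulate_tim2_capture(waveform):
--     # Phase 1: cut the waveform into segments; a low (is_unload False) element
--     # closes its segment, a trailing run of highs becomes a final segment.
--     segments = []
--     cur = []
--     for (is_unload, dur) in waveform:
--         cur.append((is_unload, dur))
--         if not is_unload:
--             segments.append(cur)
--             cur = []
--     if cur:
--         segments.append(cur)
--     # Phase 2: emit (is_unload, running prefix sum of durations) per segment.
--     events = []
--     for seg in segments:
--         s = 0
--         for (is_unload, dur) in seg:
--             s += dur
--             events.append((is_unload, s))
--     return events
-- ===== Notes on version B (the rewrite author's own statement) =====
-- stated objective: alternative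
-- what changed: Replaces A's single stateful scan with a reset counter by two distinct phases: first splitting the waveform into segments closed by each low element (plus a trailing high-run segment), then emitting per-segment prefix sums of durations.
import Mathlib
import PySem

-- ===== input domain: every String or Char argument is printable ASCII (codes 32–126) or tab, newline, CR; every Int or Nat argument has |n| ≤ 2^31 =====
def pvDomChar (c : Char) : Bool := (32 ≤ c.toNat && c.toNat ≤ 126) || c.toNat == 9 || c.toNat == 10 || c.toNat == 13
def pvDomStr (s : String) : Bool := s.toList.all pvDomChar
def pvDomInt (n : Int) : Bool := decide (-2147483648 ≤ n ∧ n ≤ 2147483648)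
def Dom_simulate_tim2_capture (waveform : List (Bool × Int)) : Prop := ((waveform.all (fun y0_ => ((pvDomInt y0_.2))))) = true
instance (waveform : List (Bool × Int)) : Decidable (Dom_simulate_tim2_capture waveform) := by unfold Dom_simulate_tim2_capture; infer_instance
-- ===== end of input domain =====

-- B re-derives A's events in two phases (segment split, then per-segment prefix sums); equivalence proved via a common recursive characterisation.
-- ===== PORT A =====
def simulate_tim2_capture (waveform : List (Bool × Int)) : List (Bool × Int) :=
  let st := waveform.foldl
    (fun (st : Int × List (Bool × Int)) p =>
      let counter := st.1 + p.2
      if p.1 then (counter, st.2 ++ [(true, counter)])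
      else (0, st.2 ++ [(false, counter)]))
    (0, [])
  st.2

-- ===== PORT B =====
-- phase 2 helper: prefix sums within one segment
def pvEmitSeg (seg : List (Bool × Int)) : List (Bool × Int) :=
  (seg.foldl (fun (st : Int × List (Bool × Int)) p =>
      let s := st.1 + p.2
      (s, st.2 ++ [(p.1, s)])) (0, [])).2

def simulate_tim2_capture_alt (waveform : List (Bool × Int)) : List (Bool × Int) :=
  -- phase 1: split into segments, a low element closes its segment
  let st := waveform.foldl
    (fun (st : List (List (Bool × Int)) × List (Bool × Int)) p =>
      let cur := st.2 ++ [p]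
      if p.1 then (st.1, cur) else (st.1 ++ [cur], []))
    ([], [])
  let segments := if st.2 = [] then st.1 else st.1 ++ [st.2]
  -- phase 2: per-segment prefix sums
  segments.foldl (fun ev seg => ev ++ pvEmitSeg seg) []

-- ===== PRECONDITION & SPEC =====
def Spec_simulate_tim2_capture (waveform : List (Bool × Int)) (out : List (Bool × Int)) : Prop := out = simulate_tim2_capture_alt waveform
instance (waveform : List (Bool × Int)) (out : List (Bool × Int)) : Decidable (Spec_simulate_tim2_capture waveform out) := by unfold Spec_simulate_tim2_capture; infer_instance

-- ===== CLAIM =====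
def Claim_equal_simulate_tim2_capture : Prop := ∀ (waveform : List (Bool × Int)), Dom_simulate_tim2_capture waveform → Spec_simulate_tim2_capture waveform (simulate_tim2_capture waveform)

-- ===== LEMMAS AND PROOFS =====
-- common recursive characterisation of the event stream
def pvF : List (Bool × Int) → Int → List (Bool × Int)
  | [], _ => []
  | (b, d) :: t, c => (b, c + d) :: pvF t (if b then c + d else 0)

def pvG : List (Bool × Int) → Int → List (Bool × Int)
  | [], _ => []
  | (b, d) :: t, s => (b, s + d) :: pvG t (s + d)

def pvSum (xs : List (Bool × Int)) : Int := (xs.map Prod.snd).sum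

def pvStep (st : List (List (Bool × Int)) × List (Bool × Int)) (p : Bool × Int) :
    List (List (Bool × Int)) × List (Bool × Int) :=
  if p.1 then (st.1, st.2 ++ [p]) else (st.1 ++ [st.2 ++ [p]], [])

def pvFlat (segs : List (List (Bool × Int))) : List (Bool × Int) :=
  segs.foldl (fun ev seg => ev ++ pvEmitSeg seg) []

def pvFin (st : List (List (Bool × Int)) × List (Bool × Int)) : List (Bool × Int) :=
  pvFlat (if st.2 = [] then st.1 else st.1 ++ [st.2])

theorem pvA_fold (w : List (Bool × Int)) : ∀ (c : Int) (acc : List (Bool × Int)),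
    (w.foldl (fun (st : Int × List (Bool × Int)) p =>
      let counter := st.1 + p.2
      if p.1 then (counter, st.2 ++ [(true, counter)])
      else (0, st.2 ++ [(false, counter)])) (c, acc)).2 = acc ++ pvF w c := by
  induction w with
  | nil => intro c acc; simp [pvF]
  | cons p t ih =>
    intro c acc
    obtain ⟨b, d⟩ := p
    cases b <;> simp [pvF, ih]

theorem pvEmitSeg_fold (seg : List (Bool × Int)) : ∀ (s : Int) (acc : List (Bool × Int)),
    (seg.foldl (fun (st : Int × List (Bool × Int)) p =>
      let s := st.1 + p.2
      (s, st.2 ++ [(p.1, s)])) (s, acc)).2 = acc ++ pvG seg s := by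
  induction seg with
  | nil => intro s acc; simp [pvG]
  | cons p t ih => intro s acc; obtain ⟨b, d⟩ := p; simp [pvG, ih]

theorem pvEmitSeg_eq (seg : List (Bool × Int)) : pvEmitSeg seg = pvG seg 0 := by
  simp [pvEmitSeg, pvEmitSeg_fold]

theorem pvG_snoc (xs : List (Bool × Int)) (p : Bool × Int) : ∀ s : Int,
    pvG (xs ++ [p]) s = pvG xs s ++ [(p.1, s + pvSum xs + p.2)] := by
  induction xs with
  | nil => intro s; simp [pvG, pvSum]
  | cons q t ih =>
    intro s
    obtain ⟨b, d⟩ := q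
    simp only [List.cons_append, pvG, ih, pvSum, List.map_cons, List.sum_cons, add_assoc]

theorem pvFlat_fold (segs : List (List (Bool × Int))) : ∀ acc,
    segs.foldl (fun ev seg => ev ++ pvEmitSeg seg) acc = acc ++ pvFlat segs := by
  induction segs with
  | nil => intro acc; simp [pvFlat]
  | cons s t ih =>
    intro acc
    rw [List.foldl_cons, ih]
    conv_rhs => rw [pvFlat, List.foldl_cons, ih]
    simp [List.append_assoc]

theorem pvFlat_snoc (segs : List (List (Bool × Int))) (s : List (Bool × Int)) :
    pvFlat (segs ++ [s]) = pvFlat segs ++ pvEmitSeg s := by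
  rw [pvFlat, List.foldl_append, pvFlat_fold]; simp [pvFlat]

theorem pvSum_snoc (xs : List (Bool × Int)) (p : Bool × Int) :
    pvSum (xs ++ [p]) = pvSum xs + p.2 := by
  simp [pvSum]

-- main invariant of B's phase-1 fold
theorem pvB_fold (w : List (Bool × Int)) :
    ∀ (segs : List (List (Bool × Int))) (cur : List (Bool × Int)),
    pvFin (w.foldl pvStep (segs, cur)) = pvFlat segs ++ pvG cur 0 ++ pvF w (pvSum cur) := by
  induction w with
  | nil =>
    intro segs cur
    cases cur with
    | nil => simp [pvFin, pvF, pvG]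
    | cons q t => simp [pvFin, pvF, pvFlat_snoc, pvEmitSeg_eq]
  | cons p t ih =>
    intro segs cur
    obtain ⟨b, d⟩ := p
    cases b
    · -- low: segment closed
      have hstep : pvStep (segs, cur) (false, d) = (segs ++ [cur ++ [(false, d)]], []) := by
        simp [pvStep]
      rw [List.foldl_cons, hstep, ih]
      simp only [pvFlat_snoc, pvEmitSeg_eq, pvG_snoc, pvG, pvSum, List.map_nil,
        List.sum_nil, pvF, Bool.false_eq_true, if_false, zero_add, List.append_assoc, List.singleton_append]
    · -- high: segment continues
      have hstep : pvStep (segs, cur) (true, d) = (segs, cur ++ [(true, d)]) := by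
        simp [pvStep]
      rw [List.foldl_cons, hstep, ih]
      simp only [pvG_snoc, pvSum_snoc, pvF, if_true, zero_add, List.append_assoc,
        List.singleton_append]

theorem pvA_eq (w : List (Bool × Int)) : simulate_tim2_capture w = pvF w 0 := by
  simp [simulate_tim2_capture, pvA_fold]

theorem pvB_eq (w : List (Bool × Int)) : simulate_tim2_capture_alt w = pvF w 0 := by
  have h : simulate_tim2_capture_alt w = pvFin (w.foldl pvStep ([], [])) := rfl
  rw [h, pvB_fold]
  simp [pvFlat, pvG, pvSum]

-- ===== VERDICT =====
theorem simulate_tim2_capture_spec : Claim_equal_simulate_tim2_capture := by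
  intro w _
  unfold Spec_simulate_tim2_capture
  rw [pvA_eq, pvB_eq]
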